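-- pv_equiv track=rewrite | github.com/boconlonton/python-deep-dive | part-3/4-specialized_dictionary/3-OrderedDict vs 3.6 dict.py | dict_equality_sensitive
-- ===== SOURCE A (Python) =====
-- def dict_equality_sensitive(d1, d2):
--     if d1 == d2:
--         for k1, k2 in zip(d1, d2):
--             if k1 != k2:
--                 return False
--         return True
--     else:
--         return False
-- ===== SOURCE B (Python) =====
-- def dict_equality_sensitive(d1, d2):
--     return list(d1.items()) == list(d2.items())
-- ===== Notes on version B (the rewrite author's own statement) =====
-- stated objective: simpler
-- what changed: B compares the ordered (key,value) item sequences position-wise in one pass, instead of A's order-insensitive dict equality followed by a separate zipped key-order loop.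
import Mathlib
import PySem

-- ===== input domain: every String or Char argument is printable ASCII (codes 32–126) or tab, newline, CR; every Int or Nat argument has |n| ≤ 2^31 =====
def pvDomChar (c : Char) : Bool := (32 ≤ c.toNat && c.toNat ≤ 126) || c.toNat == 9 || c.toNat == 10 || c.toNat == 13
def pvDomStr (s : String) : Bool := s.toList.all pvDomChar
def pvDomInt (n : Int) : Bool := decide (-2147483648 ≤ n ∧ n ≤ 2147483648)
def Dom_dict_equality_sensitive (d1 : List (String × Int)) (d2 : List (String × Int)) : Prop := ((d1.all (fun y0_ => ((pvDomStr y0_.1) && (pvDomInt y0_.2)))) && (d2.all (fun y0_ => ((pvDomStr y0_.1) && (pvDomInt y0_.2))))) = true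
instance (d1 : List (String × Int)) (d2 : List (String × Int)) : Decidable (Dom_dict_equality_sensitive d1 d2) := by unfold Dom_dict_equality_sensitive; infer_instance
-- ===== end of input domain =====

-- B replaces A's order-insensitive dict equality (d1 == d2) plus a separate zipped
-- key-order loop by a single position-wise comparison of the ordered item lists.

-- ===== PORT A =====
-- first-match association-list lookup (Python dict lookup on the nodup-key lists Pre_ admits)
def pvGetA (d : List (String × Int)) (k : String) : Option Int :=
  match d with
  | [] => none
  | (k', v) :: t => if k' = k then some v else pvGetA t k

-- Python `d1 == d2` on dicts: same size and every key of d1 maps to the same value in d2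
def pvDictEqA (d1 d2 : List (String × Int)) : Bool :=
  d1.length == d2.length && d1.all (fun kv => pvGetA d2 kv.1 == some kv.2)

-- `for k1, k2 in zip(d1, d2): if k1 != k2: return False` / `return True`
def pvZipKeysEqA : List String → List String → Bool
  | k1 :: t1, k2 :: t2 => if k1 ≠ k2 then false else pvZipKeysEqA t1 t2
  | _, _ => true

def dict_equality_sensitive (d1 : List (String × Int)) (d2 : List (String × Int)) : Bool :=
  if pvDictEqA d1 d2 then pvZipKeysEqA (d1.map Prod.fst) (d2.map Prod.fst)
  else false

-- ===== PORT B =====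
def dict_equality_sensitive_alt (d1 : List (String × Int)) (d2 : List (String × Int)) : Bool :=
  d1 == d2

-- ===== PRECONDITION & SPEC =====
-- Pre_ excludes association lists with duplicate keys: those do not represent Python dicts
-- (the arguments are dicts in A, whose keys are unique by construction), so nothing is claimed there.
def Pre_dict_equality_sensitive (d1 : List (String × Int)) (d2 : List (String × Int)) : Prop :=
  (d1.map Prod.fst).Nodup ∧ (d2.map Prod.fst).Nodup
instance (d1 : List (String × Int)) (d2 : List (String × Int)) : Decidable (Pre_dict_equality_sensitive d1 d2) := by unfold Pre_dict_equality_sensitive; infer_instance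
def pvWitness_dict_equality_sensitive : (List (String × Int)) × (List (String × Int)) :=
  ([("a", 1), ("b", 2)], [("a", 1), ("b", 2)])
def Spec_dict_equality_sensitive (d1 : List (String × Int)) (d2 : List (String × Int)) (out : Bool) : Prop := out = dict_equality_sensitive_alt d1 d2
instance (d1 : List (String × Int)) (d2 : List (String × Int)) (out : Bool) : Decidable (Spec_dict_equality_sensitive d1 d2 out) := by unfold Spec_dict_equality_sensitive; infer_instance

-- ===== CLAIM (what is proved, stated in full; the proofs are below) =====
def Claim_equal_dict_equality_sensitive : Prop := ∀ (d1 : List (String × Int)) (d2 : List (String × Int)), Dom_dict_equality_sensitive d1 d2 → Pre_dict_equality_sensitive d1 d2 → Spec_dict_equality_sensitive d1 d2 (dict_equality_sensitive d1 d2)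

-- ===== LEMMAS AND PROOFS =====

theorem pvGetA_eq_some_of_mem {d : List (String × Int)} {k : String} {v : Int}
    (hnd : (d.map Prod.fst).Nodup) (hm : (k, v) ∈ d) : pvGetA d k = some v := by
  induction d with
  | nil => cases hm
  | cons hd t ih =>
    simp only [List.map_cons, List.nodup_cons] at hnd
    rcases List.mem_cons.mp hm with hm | hm
    · simp [pvGetA, ← hm]
    · have hk : hd.1 ≠ k := by
        intro h; exact hnd.1 (h ▸ (List.mem_map.mpr ⟨(k, v), hm, rfl⟩))
      simp [pvGetA, hk, ih hnd.2 hm]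

theorem main_eq (d1 d2 : List (String × Int))
    (h1 : (d1.map Prod.fst).Nodup) (h2 : (d2.map Prod.fst).Nodup) :
    dict_equality_sensitive d1 d2 = (d1 == d2) := by
  induction d1 generalizing d2 with
  | nil =>
    cases d2 with
    | nil => decide
    | cons b t2 => simp [dict_equality_sensitive, pvDictEqA]
  | cons a t1 ih =>
    cases d2 with
    | nil => simp [dict_equality_sensitive, pvDictEqA]
    | cons b t2 =>
      simp only [List.map_cons, List.nodup_cons] at h1 h2
      by_cases hde : pvDictEqA (a :: t1) (b :: t2) = true
      · -- dict-equal: heads relate via lookup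
        have hde' := hde
        simp only [pvDictEqA, Bool.and_eq_true, beq_iff_eq, List.all_eq_true, List.all_cons] at hde'
        obtain ⟨hlen, hget_a, hget_t⟩ := hde'
        by_cases hk : a.1 = b.1
        · -- same first key ⇒ same first value, recurse on tails
          have hv : a.2 = b.2 := by
            have := hget_a
            rw [pvGetA] at this
            simp [hk.symm] at this
            omega
          have hget_t' : ∀ kv ∈ t1, pvGetA t2 kv.1 = some kv.2 := by
            intro kv hm
            have h := hget_t kv hm
            rw [pvGetA] at h
            have hne : b.1 ≠ kv.1 := fun he =>
              h1.1 (by rw [hk, he]; exact List.mem_map.mpr ⟨kv, hm, rfl⟩)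
            simpa [hne] using h
          have htde : pvDictEqA t1 t2 = true := by
            simp only [pvDictEqA, Bool.and_eq_true, beq_iff_eq, List.all_eq_true]
            constructor
            · simpa using hlen
            · intro kv hm; simpa using hget_t' kv hm
          have hA : dict_equality_sensitive (a :: t1) (b :: t2)
              = dict_equality_sensitive t1 t2 := by
            simp only [dict_equality_sensitive, hde, htde, if_true, List.map_cons]
            rw [pvZipKeysEqA]
            simp [hk]
          rw [hA, ih t2 h1.2 h2.2]
          have hab : a = b := Prod.ext hk hv
          simp [hab, List.cons_beq_cons]
        · -- different first key: A's zip loop returns false; lists differ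
          have hA : dict_equality_sensitive (a :: t1) (b :: t2) = false := by
            simp only [dict_equality_sensitive, hde, if_true, List.map_cons]
            rw [pvZipKeysEqA]
            simp [hk]
          have hab : a ≠ b := fun h => hk (by rw [h])
          simp [hA, List.cons_beq_cons, hab]
      · -- not dict-equal: A returns false; show lists unequal
        have hA : dict_equality_sensitive (a :: t1) (b :: t2) = false := by
          simp [dict_equality_sensitive, hde]
        rw [hA]
        by_cases heq : a :: t1 = b :: t2
        · exfalso
          apply hde
          injection heq with hab hts
          subst hab; subst hts
          simp only [pvDictEqA, Bool.and_eq_true, beq_iff_eq, List.all_eq_true]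
          refine ⟨trivial, ?_⟩
          intro kv hm
          exact pvGetA_eq_some_of_mem
            (by rw [List.map_cons]; exact List.nodup_cons.mpr h1) hm
        · exact (beq_eq_false_iff_ne.mpr heq).symm

-- ===== VERDICT (by name: the statement is the Claim_ definition above) =====
theorem dict_equality_sensitive_spec : Claim_equal_dict_equality_sensitive := by
  intro d1 d2 _ hpre
  unfold Spec_dict_equality_sensitive dict_equality_sensitive_alt
  exact main_eq d1 d2 hpre.1 hpre.2
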